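-- pv_equiv track=rewrite | github.com/stormhair/csci544 | hw2/preproc.py | gen_feats_ner_test
-- ===== SOURCE A (Python) =====
-- def gen_feats_ner_test(tokens):
-- 	feats = list()
-- 	words = list()
-- 	pos_tags = list()
-- 	tokens.append('EOS/EOS')
-- 	tokens.insert(0, 'BOS/BOS')
-- 	for tk in tokens:
-- 		tk = tk.split('/')
-- 		e = len(tk)
-- 		if e == 2:
-- 			words.append(tk[0])
-- 		else:
-- 			words.append('/'.join(tk[0:e-1]))
-- 		pos_tags.append(tk[e-1])
-- 	for i in range(1, len(words)-1):
-- 		feats.append('w:'+words[i]+' w_prev:'+words[i-1]+' w_next:'+words[i+1]+' pos:'+pos_tags[i]+' pos_prev:'+pos_tags[i-1]+' pos_next:'+pos_tags[i+1]+'\n')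
-- 	return feats
-- ===== SOURCE B (Python) =====
-- def _parse(tk):
--     parts = tk.split('/')
--     return '/'.join(parts[:-1]), parts[-1]
--
--
-- def gen_feats_ner_test(tokens):
--     tokens.append('EOS/EOS')
--     tokens.insert(0, 'BOS/BOS')
--     feats = []
--     window = []
--     for tk in tokens:
--         window.append(_parse(tk))
--         if len(window) == 3:
--             (pw, pp), (w, p), (nw, np) = window
--             feats.append('w:' + w + ' w_prev:' + pw + ' w_next:' + nw
--                          + ' pos:' + p + ' pos_prev:' + pp + ' pos_next:' + np + '\n')
--             window.pop(0)
--     return feats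
-- ===== Notes on version B (the rewrite author's own statement) =====
-- stated objective: alternative
-- what changed: Replaces the two-pass design (build parallel words/pos_tags lists, then an index loop over range(1,len-1)) with a single streaming pass that parses each token once (always join of all-but-last '/' segments) and keeps a sliding window of the last three parsed (word,pos) pairs, emitting a feature line whenever the window fills.
import Mathlib
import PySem

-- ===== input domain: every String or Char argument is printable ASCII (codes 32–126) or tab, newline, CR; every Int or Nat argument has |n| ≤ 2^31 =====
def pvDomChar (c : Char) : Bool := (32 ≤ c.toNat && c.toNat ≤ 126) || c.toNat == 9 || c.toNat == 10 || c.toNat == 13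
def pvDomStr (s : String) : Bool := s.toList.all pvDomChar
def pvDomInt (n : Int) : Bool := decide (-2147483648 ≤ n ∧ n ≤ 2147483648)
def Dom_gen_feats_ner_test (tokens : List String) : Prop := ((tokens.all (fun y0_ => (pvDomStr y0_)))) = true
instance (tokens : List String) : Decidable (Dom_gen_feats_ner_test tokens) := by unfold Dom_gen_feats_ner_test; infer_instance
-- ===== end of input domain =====

-- B replaces A's two passes (parallel words/pos_tags lists + an index loop over range(1, len(words)-1))
-- by one streaming pass with a sliding window of three parsed (word, pos) pairs; equivalence is about
-- the RETURN value (in Python both mutate the argument identically: append 'EOS/EOS', insert 'BOS/BOS' at 0).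

-- ===== PORT A =====
-- body of A's first loop: split the token on '/', append to words / pos_tags
def pvStepA (wp : List String × List String) (tk : String) : List String × List String :=
  let tkp := (PySem.Str.split? tk "/").getD []
  let e := tkp.length
  ((if e = 2 then wp.1 ++ [PySem.List.pyGetD tkp 0 ""]
    else wp.1 ++ [PySem.Str.join "/" (PySem.List.slice tkp (some 0) (some ((e : Int) - 1)))]),
   wp.2 ++ [PySem.List.pyGetD tkp ((e : Int) - 1) ""])

def gen_feats_ner_test (tokens : List String) : List String :=
  let tokens := PySem.List.insert (tokens ++ ["EOS/EOS"]) 0 "BOS/BOS"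
  let wp := tokens.foldl pvStepA ([], [])
  let words := wp.1
  let pos_tags := wp.2
  (PySem.List.pyRange 1 ((words.length : Int) - 1) 1).foldl (fun feats i =>
    feats ++ ["w:" ++ PySem.List.pyGetD words i "" ++ " w_prev:" ++ PySem.List.pyGetD words (i-1) ""
      ++ " w_next:" ++ PySem.List.pyGetD words (i+1) "" ++ " pos:" ++ PySem.List.pyGetD pos_tags i ""
      ++ " pos_prev:" ++ PySem.List.pyGetD pos_tags (i-1) "" ++ " pos_next:" ++ PySem.List.pyGetD pos_tags (i+1) ""
      ++ "\n"]) []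

-- ===== PORT B =====
-- Source B's helper _parse: word = '/'.join(parts[:-1]), pos = parts[-1]
def pvParse (tk : String) : String × String :=
  let parts := (PySem.Str.split? tk "/").getD []
  (PySem.Str.join "/" (PySem.List.slice parts none (some (-1))), PySem.List.pyGetD parts (-1) "")

-- body of Source B's single loop: slide the 3-window, emit the middle element's feature line when full
def pvStepB (st : List String × List (String × String)) (tk : String) :
    List String × List (String × String) :=
  let window := st.2 ++ [pvParse tk]
  match window with
  | [(pw, pp), (w, p), (nw, np)] =>
      (st.1 ++ ["w:" ++ w ++ " w_prev:" ++ pw ++ " w_next:" ++ nw ++ " pos:" ++ p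
        ++ " pos_prev:" ++ pp ++ " pos_next:" ++ np ++ "\n"], [(w, p), (nw, np)])
  | _ => (st.1, window)

def gen_feats_ner_test_alt (tokens : List String) : List String :=
  let tokens := PySem.List.insert (tokens ++ ["EOS/EOS"]) 0 "BOS/BOS"
  (tokens.foldl pvStepB ([], [])).1

-- ===== PRECONDITION & SPEC =====
def Spec_gen_feats_ner_test (tokens : List String) (out : List String) : Prop := out = gen_feats_ner_test_alt tokens
instance (tokens : List String) (out : List String) : Decidable (Spec_gen_feats_ner_test tokens out) := by unfold Spec_gen_feats_ner_test; infer_instance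

-- ===== CLAIM (what is proved, stated in full; the proofs are below) =====
def Claim_equal_gen_feats_ner_test : Prop := ∀ (tokens : List String), Dom_gen_feats_ner_test tokens → Spec_gen_feats_ner_test tokens (gen_feats_ner_test tokens)

-- ===== LEMMAS AND PROOFS =====

-- the feature line of a (prev, cur, next) triple of parsed (word, pos) pairs
def pvFeat (p c n : String × String) : String :=
  "w:" ++ c.1 ++ " w_prev:" ++ p.1 ++ " w_next:" ++ n.1 ++ " pos:" ++ c.2
    ++ " pos_prev:" ++ p.2 ++ " pos_next:" ++ n.2 ++ "\n"

-- the feature lines of all consecutive triples of a list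
def pvTri : List (String × String) → List String
  | a :: b :: c :: t => pvFeat a b c :: pvTri (b :: c :: t)
  | _ => []

-- A's per-token word value equals B's (join of all segments but the last)
theorem pv_wordA_eq (parts : List String) :
    (if parts.length = 2 then PySem.List.pyGetD parts 0 ""
     else PySem.Str.join "/" (PySem.List.slice parts (some 0) (some ((parts.length : Int) - 1)))) =
    PySem.Str.join "/" (PySem.List.slice parts none (some (-1))) := by
  rw [PySem.List.slice_to_neg_one]
  by_cases h2 : parts.length = 2
  · obtain ⟨a, b, rfl⟩ : ∃ a b, parts = [a, b] := by
      match parts, h2 with | [a,b], _ => exact ⟨a,b,rfl⟩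
    simp [PySem.Str.join, PySem.Chars.join, PySem.List.pyGetD, PySem.List.pyGet?,
          PySem.List.pyIdx?, List.intercalate]
  · rw [if_neg h2]
    cases parts with
    | nil => simp [PySem.List.slice]
    | cons x t =>
      have h1 : ((x :: t).length : Int) - 1 = ((t.length : Nat) : Int) := by simp
      rw [h1]
      simp [PySem.List.slice_to_natCast, List.dropLast_eq_take]

-- A's per-token pos value equals B's (last segment)
theorem pv_posA_eq (parts : List String) :
    PySem.List.pyGetD parts ((parts.length : Int) - 1) "" = PySem.List.pyGetD parts (-1) "" := by
  cases parts with
  | nil => simp [PySem.List.pyGetD, PySem.List.pyGet?]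
  | cons x t =>
    have h1 : ((x :: t).length : Int) - 1 = ((t.length : Nat) : Int) := by simp
    rw [h1, PySem.List.pyGetD_natCast, PySem.List.pyGetD_neg_one (x :: t) "" (by simp)]
    simp [List.getD, List.getLast_eq_getElem]
    rfl

-- A's loop body appends exactly the two components of pvParse
theorem pv_stepA_eq (wp : List String × List String) (tk : String) :
    pvStepA wp tk = (wp.1 ++ [(pvParse tk).1], wp.2 ++ [(pvParse tk).2]) := by
  simp only [pvStepA, pvParse]
  generalize (PySem.Str.split? tk "/").getD [] = parts
  rw [← pv_wordA_eq parts, ← pv_posA_eq parts]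
  split_ifs <;> rfl

-- A's first loop builds exactly the two projections of the parsed pairs
theorem pv_afold (toks : List String) (ws ps : List String) :
    toks.foldl pvStepA (ws, ps) =
      (ws ++ (toks.map pvParse).map Prod.fst, ps ++ (toks.map pvParse).map Prod.snd) := by
  induction toks generalizing ws ps with
  | nil => simp
  | cons tk t ih =>
    rw [List.foldl_cons, pv_stepA_eq, ih]
    simp

-- B's loop from a full 2-window emits every consecutive triple
theorem pv_bfold2 (l : List String) (fs : List String) (a b : String × String) :
    (l.foldl pvStepB (fs, [a, b])).1 = fs ++ pvTri (a :: b :: l.map pvParse) := by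
  induction l generalizing fs a b with
  | nil => simp [pvTri]
  | cons tk t ih =>
    obtain ⟨a1, a2⟩ := a; obtain ⟨b1, b2⟩ := b
    rw [List.foldl_cons]
    have hstep : pvStepB (fs, [(a1, a2), (b1, b2)]) tk =
        (fs ++ [pvFeat (a1, a2) (b1, b2) (pvParse tk)], [(b1, b2), pvParse tk]) := by
      unfold pvStepB pvFeat
      obtain ⟨c1, c2⟩ := pvParse tk
      rfl
    rw [hstep, ih]
    simp [pvTri]

theorem pv_bfold1 (l : List String) (fs : List String) (a : String × String) :
    (l.foldl pvStepB (fs, [a])).1 = fs ++ pvTri (a :: l.map pvParse) := by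
  cases l with
  | nil => simp [pvTri]
  | cons tk t =>
    obtain ⟨a1, a2⟩ := a
    rw [List.foldl_cons]
    have hstep : pvStepB (fs, [(a1, a2)]) tk = (fs, [(a1, a2), pvParse tk]) := by
      unfold pvStepB
      obtain ⟨c1, c2⟩ := pvParse tk
      rfl
    rw [hstep, pv_bfold2]
    simp

theorem pv_bfold0 (l : List String) :
    (l.foldl pvStepB (([] : List String), ([] : List (String × String)))).1 = pvTri (l.map pvParse) := by
  cases l with
  | nil => simp [pvTri]
  | cons tk t =>
    rw [List.foldl_cons]
    have hstep : pvStepB ([], []) tk = ([], [pvParse tk]) := by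
      unfold pvStepB
      obtain ⟨c1, c2⟩ := pvParse tk
      rfl
    rw [hstep, pv_bfold1]
    simp

-- A's index loop over the projections, re-indexed from 0, is pvTri
theorem pv_range_tri (ps : List (String × String)) :
    (List.range (ps.length - 2)).map (fun k =>
      pvFeat (ps.getD k ("", "")) (ps.getD (k+1) ("", "")) (ps.getD (k+2) ("", ""))) = pvTri ps := by
  induction ps with
  | nil => simp [pvTri]
  | cons a t ih =>
    cases t with
    | nil => simp [pvTri]
    | cons b t' =>
      cases t' with
      | nil => simp [pvTri]
      | cons c t'' =>
        have hlen : (a :: b :: c :: t'').length - 2 = t''.length + 1 := by simp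
        rw [hlen, List.range_succ_eq_map, List.map_cons, List.map_map]
        have ht : ((b :: c :: t'').length - 2) = t''.length := by simp
        simp only [List.getD_cons_zero, List.getD_cons_succ, Function.comp_def]
        rw [show pvTri (a :: b :: c :: t'') = pvFeat a b c :: pvTri (b :: c :: t'') from rfl]
        congr 1

-- getD through a projection map, in range
theorem pv_getD_map_fst (ps : List (String × String)) (j : Nat) (hj : j < ps.length) :
    (ps.map Prod.fst).getD j "" = (ps.getD j ("", "")).1 := by
  rw [List.getD_eq_getElem _ _ (by simpa using hj), List.getD_eq_getElem _ _ hj, List.getElem_map]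

theorem pv_getD_map_snd (ps : List (String × String)) (j : Nat) (hj : j < ps.length) :
    (ps.map Prod.snd).getD j "" = (ps.getD j ("", "")).2 := by
  rw [List.getD_eq_getElem _ _ (by simpa using hj), List.getD_eq_getElem _ _ hj, List.getElem_map]

theorem pv_main (tokens : List String) :
    gen_feats_ner_test tokens = gen_feats_ner_test_alt tokens := by
  unfold gen_feats_ner_test gen_feats_ner_test_alt
  simp only [PySem.List.insert_zero]
  set toks := "BOS/BOS" :: (tokens ++ ["EOS/EOS"]) with htoks
  set ps := toks.map pvParse with hps
  rw [pv_afold, pv_bfold0]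
  simp only [List.nil_append]
  rw [PySem.List.foldl_append_singleton_eq_map, List.nil_append]
  have hlenf : (ps.map Prod.fst).length = ps.length := by simp
  rw [hlenf]
  rw [PySem.List.pyRange_one]
  have hcast : ((ps.length : Int) - 1 - 1).toNat = ps.length - 2 := by omega
  rw [hcast, List.map_map]
  rw [← pv_range_tri ps]
  apply List.map_congr_left
  intro k hk
  have hk2 : k + 2 < ps.length := by
    have := List.mem_range.mp hk; omega
  have e1 : (1 : Int) + k = ((k + 1 : Nat) : Int) := by omega
  have e2' : ((k + 1 : Nat) : Int) - 1 = ((k : Nat) : Int) := by omega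
  have e3' : ((k + 1 : Nat) : Int) + 1 = ((k + 2 : Nat) : Int) := by omega
  simp only [Function.comp_def, e1, e2', e3', PySem.List.pyGetD_natCast]
  rw [pv_getD_map_fst ps k (by omega), pv_getD_map_fst ps (k+1) (by omega),
      pv_getD_map_fst ps (k+2) (by omega), pv_getD_map_snd ps k (by omega),
      pv_getD_map_snd ps (k+1) (by omega), pv_getD_map_snd ps (k+2) (by omega)]
  rfl

-- ===== VERDICT (by name: the statement is the Claim_ definition above) =====
theorem gen_feats_ner_test_spec : Claim_equal_gen_feats_ner_test := by
  intro tokens _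
  unfold Spec_gen_feats_ner_test
  exact pv_main tokens
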